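-- pv_equiv track=rewrite | github.com/wayne1199111810/NLP | dialog-act-classification/DialogAct.py | addSpace2Punctuation
-- ===== SOURCE A (Python) =====
-- import string
--
-- def addSpace2Punctuation(body):
-- 	modified_body = ''
-- 	for i in range(len(body)):
-- 		if body[i] in string.punctuation and i + 1 < len(body) and body[i + 1].isspace():
-- 			modified_body += ' ' + body[i]
-- 		elif body[i] in string.punctuation and i + 1 == len(body):
-- 			modified_body += ' ' + body[i]
-- 		else:
-- 			modified_body += body[i].lower()
-- 	return modified_body.strip().split()
-- ===== SOURCE B (Python) =====
-- import string
--
-- def addSpace2Punctuation(body):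
--     # One pass: build the token list directly instead of building a
--     # modified string and splitting it afterwards.
--     tokens = []
--     buf = []
--     n = len(body)
--     for i, c in enumerate(body):
--         if c in string.punctuation and (i + 1 == n or body[i + 1].isspace()):
--             if buf:
--                 tokens.append(''.join(buf))
--                 buf = []
--             tokens.append(c)
--         elif c.isspace():
--             if buf:
--                 tokens.append(''.join(buf))
--                 buf = []
--         else:
--             buf.append(c.lower())
--     if buf:
--         tokens.append(''.join(buf))
--     return tokens
-- ===== Notes on version B (the rewrite author's own statement) =====
-- stated objective: alternative
-- what changed: B emits the token list directly in a single pass with a word buffer (flushing on whitespace and on isolated punctuation), instead of A's build-a-modified-string-by-concatenation followed by strip() and split().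
import Mathlib
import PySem

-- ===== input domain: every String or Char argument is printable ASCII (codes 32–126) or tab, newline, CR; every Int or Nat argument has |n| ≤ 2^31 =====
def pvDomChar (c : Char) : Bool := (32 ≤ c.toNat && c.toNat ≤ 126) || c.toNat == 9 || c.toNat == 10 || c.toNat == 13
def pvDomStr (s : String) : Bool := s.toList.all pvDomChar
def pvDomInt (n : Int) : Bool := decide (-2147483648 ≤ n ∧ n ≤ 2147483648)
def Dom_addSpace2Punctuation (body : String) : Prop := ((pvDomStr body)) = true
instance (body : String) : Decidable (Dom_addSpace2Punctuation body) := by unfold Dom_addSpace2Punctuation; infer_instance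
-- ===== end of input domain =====

-- B builds the token list directly in one pass instead of building a modified string and then stripping/splitting it (objective: alternative).

-- ===== PORT A =====
-- string.punctuation
def pvPunct : List Char :=
  ['!', '"', '#', '$', '%', '&', '\'', '(', ')', '*', '+', ',', '-', '.', '/',
   ':', ';', '<', '=', '>', '?', '@', '[', '\\', ']', '^', '_', '`', '{', '|', '}', '~']

-- "c in string.punctuation" for a single character = membership
def pvIsPunct (c : Char) : Bool := pvPunct.contains c

-- the loop of A: builds modified_body character by character
def pvGoA : List Char → List Char
  | [] => []
  | c :: rest =>
    if pvIsPunct c && (match rest with | d :: _ => PySem.Chars.isspace d | [] => false) then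
      ' ' :: c :: pvGoA rest
    else if pvIsPunct c && rest.isEmpty then
      ' ' :: c :: pvGoA rest
    else
      PySem.Chars.lowerChar c :: pvGoA rest

def addSpace2Punctuation (body : String) : List String :=
  PySem.Str.split₀ (PySem.Str.strip (String.ofList (pvGoA body.toList)))

-- ===== PORT B =====
-- "i + 1 == n or body[i + 1].isspace()" as a lookahead on the remaining characters
def pvNextSpaceOrEnd : List Char → Bool
  | [] => true
  | d :: _ => PySem.Chars.isspace d

-- the loop of B: buf is the current word, tokens are emitted head-first
def pvGoB : List Char → List Char → List String
  | buf, [] => if buf.isEmpty then [] else [String.ofList buf]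
  | buf, c :: rest =>
    if pvIsPunct c && pvNextSpaceOrEnd rest then
      if buf.isEmpty then String.ofList [c] :: pvGoB [] rest
      else String.ofList buf :: String.ofList [c] :: pvGoB [] rest
    else if PySem.Chars.isspace c then
      if buf.isEmpty then pvGoB buf rest
      else String.ofList buf :: pvGoB [] rest
    else
      pvGoB (buf ++ [PySem.Chars.lowerChar c]) rest

def addSpace2Punctuation_alt (body : String) : List String := pvGoB [] body.toList

-- ===== PRECONDITION & SPEC =====
def Spec_addSpace2Punctuation (body : String) (out : List String) : Prop := out = addSpace2Punctuation_alt body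
instance (body : String) (out : List String) : Decidable (Spec_addSpace2Punctuation body out) := by unfold Spec_addSpace2Punctuation; infer_instance

-- ===== CLAIM (what is proved, stated in full; the proofs are below) =====
def Claim_equal_addSpace2Punctuation : Prop := ∀ (body : String), Dom_addSpace2Punctuation body → Spec_addSpace2Punctuation body (addSpace2Punctuation body)

-- ===== LEMMAS AND PROOFS =====

-- lowering a character never changes whether it is whitespace
theorem pv_isspace_lower (c : Char) :
    PySem.Chars.isspace (PySem.Chars.lowerChar c) = PySem.Chars.isspace c := by
  unfold PySem.Chars.lowerChar
  by_cases h : PySem.Chars.isupper c = true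
  · have hb : 65 ≤ c.toNat ∧ c.toNat ≤ 90 := by
      simp [PySem.Chars.isupper, Char.le_def] at h; exact ⟨h.1, h.2⟩
    have hv : (Char.ofNat (c.toNat + 32)).toNat = c.toNat + 32 := by
      rw [Char.toNat_ofNat, if_pos]; left; omega
    have h1 : PySem.Chars.isspace (Char.ofNat (c.toNat + 32)) = false := by
      unfold PySem.Chars.isspace; rw [hv]
      simp only [Bool.or_eq_false_iff, Bool.and_eq_false_iff, decide_eq_false_iff_not]
      omega
    have h2 : PySem.Chars.isspace c = false := by
      unfold PySem.Chars.isspace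
      simp only [Bool.or_eq_false_iff, Bool.and_eq_false_iff, decide_eq_false_iff_not]
      omega
    simp [h, h1, h2]
  · simp [h]

-- punctuation characters are not whitespace
theorem pv_punct_not_space (c : Char) (h : pvIsPunct c = true) :
    PySem.Chars.isspace c = false := by
  have hm : c ∈ pvPunct := by
    simpa [pvIsPunct, List.contains_iff_mem] using h
  fin_cases hm <;> decide

-- split₀.go only ever appends to the accumulator
theorem pv_go_acc (s : List Char) (cur : List Char) (acc : List (List Char)) :
    PySem.Chars.split₀.go s cur acc = acc.reverse ++ PySem.Chars.split₀.go s cur [] := by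
  induction s generalizing cur acc with
  | nil =>
    rw [PySem.Chars.split₀.go.eq_def, PySem.Chars.split₀.go.eq_def]
    by_cases h : cur.isEmpty <;> simp [h]
  | cons c s ih =>
    rw [PySem.Chars.split₀.go.eq_def]
    conv_rhs => rw [PySem.Chars.split₀.go.eq_def]
    by_cases hs : PySem.Chars.isspace c
    · by_cases h : cur.isEmpty
      · simp only [hs, h, if_true]; exact ih [] acc
      · simp only [hs, h, if_true]
        rw [ih [] (cur.reverse :: acc), ih [] [cur.reverse]]
        simp
    · simp only [hs]; exact ih (c :: cur) acc

-- a whitespace-only remainder contributes nothing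
theorem pv_go_spaces (tl : List Char) (h : ∀ c ∈ tl, PySem.Chars.isspace c = true)
    (cur : List Char) (acc : List (List Char)) :
    PySem.Chars.split₀.go tl cur acc = PySem.Chars.split₀.go [] cur acc := by
  induction tl generalizing cur acc with
  | nil => rfl
  | cons c tl ih =>
    have hc : PySem.Chars.isspace c = true := h c (by simp)
    have htl : ∀ d ∈ tl, PySem.Chars.isspace d = true := fun d hd => h d (by simp [hd])
    conv_lhs => rw [PySem.Chars.split₀.go.eq_def]
    by_cases hcur : cur.isEmpty
    · have hce : cur = [] := by simpa [List.isEmpty_iff] using hcur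
      subst hce
      simp only [hc, List.isEmpty_nil, if_true]
      exact ih htl [] acc
    · simp only [hc, hcur, if_true, Bool.false_eq_true, if_false]
      rw [ih htl [] (cur.reverse :: acc)]
      conv_lhs => rw [PySem.Chars.split₀.go.eq_def]
      conv_rhs => rw [PySem.Chars.split₀.go.eq_def]
      simp [hcur]

-- trailing whitespace does not change the split
theorem pv_go_append_spaces (s tl : List Char) (h : ∀ c ∈ tl, PySem.Chars.isspace c = true)
    (cur : List Char) (acc : List (List Char)) :
    PySem.Chars.split₀.go (s ++ tl) cur acc = PySem.Chars.split₀.go s cur acc := by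
  induction s generalizing cur acc with
  | nil => simpa using pv_go_spaces tl h cur acc
  | cons c s ih =>
    rw [List.cons_append, PySem.Chars.split₀.go.eq_def]
    conv_rhs => rw [PySem.Chars.split₀.go.eq_def]
    by_cases hs : PySem.Chars.isspace c
    · by_cases hcur : cur.isEmpty <;> simp [hs, hcur, ih]
    · simp [hs, ih]

theorem pv_split₀_rstrip (s : List Char) :
    PySem.Chars.split₀ (PySem.Chars.rstrip s) = PySem.Chars.split₀ s := by
  unfold PySem.Chars.split₀ PySem.Chars.rstrip
  have hdecomp : (s.reverse.dropWhile PySem.Chars.isspace).reverse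
      ++ (s.reverse.takeWhile PySem.Chars.isspace).reverse = s := by
    rw [← List.reverse_append, List.takeWhile_append_dropWhile, List.reverse_reverse]
  have hsp : ∀ c ∈ (s.reverse.takeWhile PySem.Chars.isspace).reverse,
      PySem.Chars.isspace c = true := by
    intro c hc
    exact List.mem_takeWhile_imp (by simpa using hc)
  conv_rhs => rw [← hdecomp]
  rw [pv_go_append_spaces _ _ hsp]

theorem pv_split₀_lstrip (s : List Char) :
    PySem.Chars.split₀ (PySem.Chars.lstrip s) = PySem.Chars.split₀ s := by
  unfold PySem.Chars.split₀ PySem.Chars.lstrip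
  induction s with
  | nil => rfl
  | cons c s ih =>
    by_cases hs : PySem.Chars.isspace c
    · rw [List.dropWhile_cons_of_pos (by simpa using hs)]
      rw [ih]
      conv_rhs => rw [PySem.Chars.split₀.go.eq_def]
      simp [hs]
    · rw [List.dropWhile_cons_of_neg (by simpa using hs)]

theorem pv_split₀_strip (s : List Char) :
    PySem.Chars.split₀ (PySem.Chars.strip s) = PySem.Chars.split₀ s := by
  unfold PySem.Chars.strip
  rw [pv_split₀_rstrip, pv_split₀_lstrip]

-- the heart of the proof: splitting A's modified text yields exactly B's tokens
theorem pv_main : ∀ n (l : List Char), l.length ≤ n → ∀ buf : List Char,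
    (PySem.Chars.split₀.go (pvGoA l) buf.reverse []).map String.ofList = pvGoB buf l := by
  intro n
  induction n with
  | zero =>
    intro l hl buf
    have : l = [] := by cases l <;> simp_all
    subst this
    rw [pvGoA, PySem.Chars.split₀.go.eq_def]
    by_cases hb : buf.isEmpty <;> simp [pvGoB, hb]
  | succ n ih =>
    intro l hl buf
    match l with
    | [] =>
      rw [pvGoA, PySem.Chars.split₀.go.eq_def]
      by_cases hb : buf.isEmpty <;> simp [pvGoB, hb]
    | c :: rest =>
      by_cases hcond : (pvIsPunct c && pvNextSpaceOrEnd rest) = true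
      · -- punctuation followed by whitespace or end
        have hp : pvIsPunct c = true := by simp_all
        have hns : pvNextSpaceOrEnd rest = true := by simp_all
        have hspc : PySem.Chars.isspace c = false := pv_punct_not_space c hp
        have hgoA : pvGoA (c :: rest) = ' ' :: c :: pvGoA rest := by
          match rest with
          | [] => simp [pvGoA, hp]
          | d :: r' =>
            have hd : PySem.Chars.isspace d = true := hns
            simp [pvGoA, hp, hd]
        rw [hgoA, PySem.Chars.split₀.go.eq_def]
        have hsp : PySem.Chars.isspace ' ' = true := by decide
        simp only [hsp, if_true]
        by_cases hb : buf.isEmpty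
        · have hbe : buf = [] := by simpa [List.isEmpty_iff] using hb
          subst hbe
          simp only [List.isEmpty_nil, List.reverse_nil, if_true]
          rw [PySem.Chars.split₀.go.eq_def]
          simp only [hspc, Bool.false_eq_true, if_false]
          match rest with
          | [] =>
            rw [pvGoA, PySem.Chars.split₀.go.eq_def]
            simp [pvGoB, pvNextSpaceOrEnd, hp]
          | d :: r' =>
            have hd : PySem.Chars.isspace d = true := hns
            have hpd : pvIsPunct d = false := by
              by_contra h
              have := pv_punct_not_space d (by simpa using h)
              simp_all
            have hgd : pvGoA (d :: r') = PySem.Chars.lowerChar d :: pvGoA r' := by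
              simp [pvGoA, hpd]
            rw [hgd, PySem.Chars.split₀.go.eq_def]
            have hld : PySem.Chars.isspace (PySem.Chars.lowerChar d) = true := by
              rw [pv_isspace_lower]; exact hd
            simp only [hld, if_true]
            norm_num
            rw [pv_go_acc]
            have hih := ih r' (by simp at hl; omega) []
            simp only [List.reverse_nil] at hih
            simp only [List.map_append, hih]
            simp [pvGoB, pvNextSpaceOrEnd, hp, hd, hpd]
        · have hbr : buf.reverse.isEmpty = false := by
            simp [List.isEmpty_iff] at *; exact hb
          simp only [hbr, Bool.false_eq_true, if_false]
          rw [PySem.Chars.split₀.go.eq_def]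
          simp only [hspc, Bool.false_eq_true, if_false, List.reverse_reverse]
          match rest with
          | [] =>
            rw [pvGoA, PySem.Chars.split₀.go.eq_def]
            simp [pvGoB, pvNextSpaceOrEnd, hp, hb]
          | d :: r' =>
            have hd : PySem.Chars.isspace d = true := hns
            have hpd : pvIsPunct d = false := by
              by_contra h
              have := pv_punct_not_space d (by simpa using h)
              simp_all
            have hgd : pvGoA (d :: r') = PySem.Chars.lowerChar d :: pvGoA r' := by
              simp [pvGoA, hpd]
            rw [hgd, PySem.Chars.split₀.go.eq_def]
            have hld : PySem.Chars.isspace (PySem.Chars.lowerChar d) = true := by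
              rw [pv_isspace_lower]; exact hd
            simp only [hld, if_true]
            norm_num
            rw [pv_go_acc]
            have hih := ih r' (by simp at hl; omega) []
            simp only [List.reverse_nil] at hih
            simp only [List.map_append, hih]
            simp [pvGoB, pvNextSpaceOrEnd, hp, hd, hpd, hb]
      · -- not an isolated punctuation character
        have hgoA : pvGoA (c :: rest) = PySem.Chars.lowerChar c :: pvGoA rest := by
          match rest with
          | [] =>
            have : pvIsPunct c = false := by
              by_contra h
              exact hcond (by simp_all [pvNextSpaceOrEnd])
            simp [pvGoA, this]
          | d :: r' =>
            by_cases hp : pvIsPunct c = true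
            · have hd : PySem.Chars.isspace d = false := by
                by_contra h
                exact hcond (by simp_all [pvNextSpaceOrEnd])
              simp [pvGoA, hp, hd]
            · simp [pvGoA, hp]
        rw [hgoA, PySem.Chars.split₀.go.eq_def]
        by_cases hs : PySem.Chars.isspace c = true
        · have hlc : PySem.Chars.isspace (PySem.Chars.lowerChar c) = true := by
            rw [pv_isspace_lower]; exact hs
          simp only [hlc, if_true]
          by_cases hb : buf.isEmpty
          · have hbe : buf = [] := by simpa [List.isEmpty_iff] using hb
            subst hbe
            simp only [List.reverse_nil, List.isEmpty_nil, if_true]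
            have hih := ih rest (by simp at hl; omega) []
            simp only [List.reverse_nil] at hih
            rw [hih]
            simp [pvGoB, hcond, hs]
          · have hbr : buf.reverse.isEmpty = false := by
              simp [List.isEmpty_iff] at *; exact hb
            simp only [hbr, Bool.false_eq_true, if_false, List.reverse_reverse]
            rw [pv_go_acc]
            have hih := ih rest (by simp at hl; omega) []
            simp only [List.reverse_nil] at hih
            simp only [List.map_append, hih]
            simp [pvGoB, hcond, hs, hb]
        · have hlc : PySem.Chars.isspace (PySem.Chars.lowerChar c) = false := by
            rw [pv_isspace_lower]; simpa using hs
          simp only [hlc, Bool.false_eq_true, if_false]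
          have : PySem.Chars.lowerChar c :: buf.reverse = (buf ++ [PySem.Chars.lowerChar c]).reverse := by
            simp
          rw [this]
          rw [ih rest (by simp at hl; omega) (buf ++ [PySem.Chars.lowerChar c])]
          simp [pvGoB, hcond, hs]

-- ===== VERDICT (by name: the statement is the Claim_ definition above) =====
theorem addSpace2Punctuation_spec : Claim_equal_addSpace2Punctuation := by
  intro body _
  unfold Spec_addSpace2Punctuation addSpace2Punctuation addSpace2Punctuation_alt
  simp only [PySem.Str.split₀, PySem.Str.strip]
  simp only [String.toList_ofList]
  rw [pv_split₀_strip]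
  unfold PySem.Chars.split₀
  have h := pv_main body.toList.length body.toList (le_refl _) []
  simpa using h
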